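-- pv_equiv track=rewrite | github.com/drvietcanh/nutrition | clinical-nutrition/fix-vietnamese-capitalization-ultra.py | precompute_sentence_boundaries
-- ===== SOURCE A (Python) =====
-- from typing import List, Tuple, Set, Dict, Optional
--
-- SENTENCE_ENDERS = '.!?\n'
--
-- def precompute_sentence_boundaries(content: str) -> Set[int]:
--     """
--     Pre-compute tất cả vị trí đầu câu để tránh tính toán lại
--     Trả về set các vị trí là đầu câu
--     """
--     boundaries = {0}  # Vị trí 0 luôn là đầu câu
--
--     for i, char in enumerate(content):
--         if char in SENTENCE_ENDERS:
--             # Tìm vị trí bắt đầu của từ tiếp theo (bỏ qua spaces)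
--             j = i + 1
--             while j < len(content) and content[j].isspace():
--                 j += 1
--             if j < len(content):
--                 boundaries.add(j)
--
--         # Sau dấu hai chấm (nếu trước đó là dấu kết thúc câu)
--         if char == ':' and i > 0:
--             if content[i - 1] in SENTENCE_ENDERS:
--                 j = i + 1
--                 while j < len(content) and content[j].isspace():
--                     j += 1
--                 if j < len(content):
--                     boundaries.add(j)
--
--     return boundaries
-- ===== SOURCE B (Python) =====
-- SENTENCE_ENDERS = '.!?\n'
--
-- def precompute_sentence_boundaries(content: str):
--     """One forward pass: remember a pending sentence-just-ended flag and add
--     the next non-space index when it appears, instead of rescanning forward."""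
--     boundaries = {0}
--     pending = False
--     for i, ch in enumerate(content):
--         if pending and not ch.isspace():
--             boundaries.add(i)
--             pending = False
--         if ch in SENTENCE_ENDERS or (ch == ':' and i > 0 and content[i - 1] in SENTENCE_ENDERS):
--             pending = True
--     return boundaries
-- ===== Notes on version B (the rewrite author's own statement) =====
-- stated objective: alternative
-- what changed: Replaces A's inner while-loop rescan after every sentence ender with a single forward pass carrying a pending-sentence-start flag that marks the next non-space index.
import Mathlib
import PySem

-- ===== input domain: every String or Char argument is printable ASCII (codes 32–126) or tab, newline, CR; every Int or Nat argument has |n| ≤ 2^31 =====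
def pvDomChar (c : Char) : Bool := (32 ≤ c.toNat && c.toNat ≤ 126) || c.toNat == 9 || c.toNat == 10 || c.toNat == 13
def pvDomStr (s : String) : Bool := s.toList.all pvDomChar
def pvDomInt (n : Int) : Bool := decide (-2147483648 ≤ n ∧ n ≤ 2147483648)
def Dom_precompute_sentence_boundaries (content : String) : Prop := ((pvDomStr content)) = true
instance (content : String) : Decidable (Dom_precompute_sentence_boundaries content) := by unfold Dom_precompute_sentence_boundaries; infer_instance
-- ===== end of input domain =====

-- B replaces A's inner rescan after every sentence ender by a single forward pass with a
-- pending-sentence-start flag (objective: alternative algorithm, same return value).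

-- ===== PORT A =====
-- SENTENCE_ENDERS = '.!?\n'
def pvEnders : List Char := ['.', '!', '?', '\n']

-- 'j = i+1; while j < len(content) and content[j].isspace(): j += 1' (returns the final j)
def pvScan (cs : List Char) (j : Nat) : Nat :=
  if h : j < cs.length then
    if PySem.Chars.isspace cs[j] then pvScan cs (j + 1) else j
  else j
termination_by cs.length - j

-- the 'for i, char in enumerate(content)' loop of A; cs is the whole string, rest = cs.drop i
def pvALoop (cs : List Char) (rest : List Char) (i : Nat) (b : List Int) : List Int :=
  match rest with
  | [] => b
  | ch :: rest' =>
    let b1 := if pvEnders.contains ch then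
        (let j := pvScan cs (i + 1)
         if j < cs.length then PySem.Set.add b (j : Int) else b)
      else b
    let b2 := if ch == ':' && decide (0 < i) && pvEnders.contains (cs.getD (i - 1) ' ') then
        (let j := pvScan cs (i + 1)
         if j < cs.length then PySem.Set.add b1 (j : Int) else b1)
      else b1
    pvALoop cs rest' (i + 1) b2

def precompute_sentence_boundaries (content : String) : List Int :=
  pvALoop content.toList content.toList 0 [(0 : Int)]

-- ===== PORT B =====
-- single pass with a pending flag; cs is the whole string, rest = cs.drop i
def pvBLoop (cs : List Char) (rest : List Char) (i : Nat) (b : List Int) (pending : Bool) : List Int :=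
  match rest with
  | [] => b
  | ch :: rest' =>
    let st := if pending && !PySem.Chars.isspace ch then (PySem.Set.add b (i : Int), false)
              else (b, pending)
    let pending' := if pvEnders.contains ch ||
        (ch == ':' && decide (0 < i) && pvEnders.contains (cs.getD (i - 1) ' ')) then true else st.2
    pvBLoop cs rest' (i + 1) st.1 pending'

def precompute_sentence_boundaries_alt (content : String) : List Int :=
  pvBLoop content.toList content.toList 0 [(0 : Int)] false

-- ===== PRECONDITION & SPEC =====
def Spec_precompute_sentence_boundaries (content : String) (out : List Int) : Prop := out = precompute_sentence_boundaries_alt content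
instance (content : String) (out : List Int) : Decidable (Spec_precompute_sentence_boundaries content out) := by unfold Spec_precompute_sentence_boundaries; infer_instance

-- ===== CLAIM (what is proved, stated in full; the proofs are below) =====
def Claim_equal_precompute_sentence_boundaries : Prop := ∀ (content : String), Dom_precompute_sentence_boundaries content → Spec_precompute_sentence_boundaries content (precompute_sentence_boundaries content)

-- ===== LEMMAS AND PROOFS =====

-- the loop-trigger condition at index i (false past the end: ' ' is neither an ender nor ':')
def pvTrig (cs : List Char) (i : Nat) : Bool :=
  pvEnders.contains (cs.getD i ' ') ||
    (cs.getD i ' ' == ':' && decide (0 < i) && pvEnders.contains (cs.getD (i - 1) ' '))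

-- B's pending flag on entry to iteration j
def pvPend (cs : List Char) : Nat → Bool
  | 0 => false
  | j + 1 => pvTrig cs j || (pvPend cs j && PySem.Chars.isspace (cs.getD j ' '))

-- positions B adds
def pvP (cs : List Char) (t : Nat) : Bool :=
  pvPend cs t && !PySem.Chars.isspace (cs.getD t ' ')

-- positions A has added after the first i iterations
def pvAdded (cs : List Char) (i j' : Nat) : Bool :=
  (List.range i).any (fun t => pvTrig cs t && (pvScan cs (t + 1) == j'))

theorem pvScan_ge (cs : List Char) (j : Nat) : j ≤ pvScan cs j := by
  fun_induction pvScan with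
  | case1 j h hs ih => omega
  | case2 j h hs => omega
  | case3 j h => omega

theorem pvScan_mono (cs : List Char) {a b : Nat} (h : a ≤ b) : pvScan cs a ≤ pvScan cs b := by
  induction b with
  | zero => simp_all
  | succ b ih =>
    rcases Nat.lt_or_ge a (b + 1) with h1 | h1
    · have := ih (by omega)
      have hstep : pvScan cs b ≤ pvScan cs (b + 1) := by
        rw [pvScan]
        split_ifs with h2 h3
        · exact le_refl _
        · have := pvScan_ge cs (b + 1); omega
        · have := pvScan_ge cs (b + 1); omega
      omega
    · have : a = b + 1 := by omega
      subst this; exact le_refl _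

theorem pvScan_stop (cs : List Char) (j : Nat) :
    pvScan cs j < cs.length → PySem.Chars.isspace (cs.getD (pvScan cs j) ' ') = false := by
  fun_induction pvScan with
  | case1 j h hs ih => exact ih
  | case2 j h hs =>
    intro _
    rw [List.getD_eq_getElem _ _ h]
    simpa using hs
  | case3 j h => intro hc; omega

theorem pvScan_between (cs : List Char) (j k : Nat) (h1 : j ≤ k) (h2 : k < pvScan cs j) :
    PySem.Chars.isspace (cs.getD k ' ') = true := by
  induction hd : cs.length - j generalizing j with
  | zero =>
    rw [pvScan, dif_neg (by omega)] at h2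
    omega
  | succ d ih =>
    by_cases ha : j < cs.length
    · rw [pvScan, dif_pos ha] at h2
      split_ifs at h2 with hb
      · rcases Nat.eq_or_lt_of_le h1 with rfl | hlt
        · rw [List.getD_eq_getElem _ _ ha]; exact hb
        · exact ih (j + 1) hlt h2 (by omega)
      · omega
    · rw [pvScan, dif_neg ha] at h2
      omega

theorem pvScan_eq_of (cs : List Char) (j m : Nat) (h1 : j ≤ m) (h2 : m < cs.length)
    (hsp : ∀ k, j ≤ k → k < m → PySem.Chars.isspace (cs.getD k ' ') = true)
    (hns : PySem.Chars.isspace (cs.getD m ' ') = false) : pvScan cs j = m := by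
  induction hk : m - j generalizing j with
  | zero =>
    have : j = m := by omega
    subst this
    have hns' : PySem.Chars.isspace cs[j] = false := by
      rw [← List.getD_eq_getElem _ ' ' h2]; exact hns
    rw [pvScan, dif_pos h2, if_neg (by simp [hns'])]
  | succ d ih =>
    have hjm : j < m := by omega
    rw [pvScan, dif_pos (by omega), if_pos]
    · exact ih (j + 1) (by omega) (fun k hk1 hk2 => hsp k (by omega) hk2) (by omega)
    · have := hsp j (le_refl _) hjm
      rw [List.getD_eq_getElem _ ' ' (by omega : j < cs.length)] at this
      exact this

theorem pvPend_iff (cs : List Char) (j : Nat) :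
    pvPend cs j = true ↔ ∃ t, t < j ∧ pvTrig cs t = true ∧
      ∀ k, t < k → k < j → PySem.Chars.isspace (cs.getD k ' ') = true := by
  induction j with
  | zero => simp [pvPend]
  | succ j ih =>
    simp only [pvPend, Bool.or_eq_true, Bool.and_eq_true]
    constructor
    · rintro (ht | ⟨hp, hsp⟩)
      · exact ⟨j, by omega, ht, fun k hk1 hk2 => by omega⟩
      · obtain ⟨t, ht1, ht2, ht3⟩ := ih.mp hp
        refine ⟨t, by omega, ht2, fun k hk1 hk2 => ?_⟩
        rcases Nat.lt_or_ge k j with h | h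
        · exact ht3 k hk1 h
        · have : k = j := by omega
          subst this; exact hsp
    · rintro ⟨t, ht1, ht2, ht3⟩
      rcases Nat.eq_or_lt_of_le (Nat.lt_succ_iff.mp ht1) with rfl | hlt
      · exact Or.inl ht2
      · exact Or.inr ⟨ih.mpr ⟨t, hlt, ht2, fun k hk1 hk2 => ht3 k hk1 (by omega)⟩,
          ht3 j hlt (by omega)⟩

theorem pvPend_pos (cs : List Char) (j : Nat) (h : pvPend cs j = true) : 1 ≤ j := by
  cases j with
  | zero => simp [pvPend] at h
  | succ j => omega

-- final agreement of the two characterisations on range n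
theorem pvAdded_eq_P (cs : List Char) (j' : Nat) (h : j' < cs.length) :
    pvAdded cs cs.length j' = pvP cs j' := by
  rw [Bool.eq_iff_iff]
  simp only [pvAdded, List.any_eq_true, List.mem_range, Bool.and_eq_true, beq_iff_eq,
    pvP, Bool.not_eq_true']
  constructor
  · rintro ⟨t, htn, htrig, hscan⟩
    have hge := pvScan_ge cs (t + 1)
    have htj : t < j' := by omega
    refine ⟨?_, ?_⟩
    · exact (pvPend_iff cs j').mpr ⟨t, htj, htrig,
        fun k hk1 hk2 => pvScan_between cs (t + 1) k (by omega) (by omega)⟩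
    · have := pvScan_stop cs (t + 1) (by omega)
      rwa [hscan] at this
  · rintro ⟨hp, hns⟩
    obtain ⟨t, ht1, ht2, ht3⟩ := (pvPend_iff cs j').mp hp
    refine ⟨t, by omega, ht2, ?_⟩
    exact (pvScan_eq_of cs (t + 1) j' (by omega) h
      (fun k hk1 hk2 => ht3 k (by omega) hk2) hns)

-- filter plumbing
theorem pvFilter_high {p : Nat → Bool} (m n : Nat) (hmn : m ≤ n)
    (h : ∀ j', m ≤ j' → p j' = false) :
    (List.range n).filter p = (List.range m).filter p := by
  induction n with
  | zero =>
    have : m = 0 := by omega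
    subst this; rfl
  | succ n ih =>
    rcases Nat.eq_or_lt_of_le hmn with rfl | hlt
    · rfl
    · rw [List.range_succ, List.filter_append, ih (by omega)]
      simp [h n (by omega)]

theorem pvFilter_point {p q : Nat → Bool} (s n : Nat) (hs : s < n)
    (hagree : ∀ j', j' ≠ s → q j' = p j') (hqs : q s = true) (hps : p s = false)
    (hbound : ∀ j', p j' = true → j' ≤ s) :
    (List.range n).filter q = (List.range n).filter p ++ [s] := by
  have hpfalse : ∀ j', s ≤ j' → p j' = false := by
    intro j' hj'
    by_cases hj : j' = s
    · subst hj; exact hps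
    · cases hpj : p j'
      · rfl
      · have := hbound j' hpj; omega
  have hqfalse : ∀ j', s + 1 ≤ j' → q j' = false := by
    intro j' hj'
    rw [hagree j' (by omega)]
    exact hpfalse j' (by omega)
  rw [pvFilter_high (s + 1) n hs hqfalse, pvFilter_high s n (by omega) hpfalse,
    List.range_succ, List.filter_append,
    List.filter_congr (fun x hx => hagree x (by simp at hx; omega))]
  simp [hqs]

theorem pvDrop_cons (cs : List Char) (j : Nat) (hj : j < cs.length) :
    cs.drop j = cs.getD j ' ' :: cs.drop (j + 1) := by
  rw [List.drop_eq_getElem_cons hj, List.getD_eq_getElem _ _ hj]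

theorem pvP_high (cs : List Char) (t : Nat) (h : cs.length ≤ t) : pvP cs t = false := by
  have h1 : cs.getD t ' ' = ' ' := List.getD_eq_default _ _ h
  unfold pvP
  rw [h1]
  simp [show PySem.Chars.isspace ' ' = true from by decide]

theorem pvTrig_high (cs : List Char) (t : Nat) (h : cs.length ≤ t) : pvTrig cs t = false := by
  have h1 : cs.getD t ' ' = ' ' := List.getD_eq_default _ _ h
  unfold pvTrig
  rw [h1]
  simp [pvEnders]

theorem pvAdded_high (cs : List Char) (i j' : Nat) (h : cs.length ≤ i) :
    pvAdded cs i j' = pvAdded cs cs.length j' := by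
  rw [Bool.eq_iff_iff]
  simp only [pvAdded, List.any_eq_true, List.mem_range]
  constructor
  · rintro ⟨t, ht, hb⟩
    rcases Nat.lt_or_ge t cs.length with h2 | h2
    · exact ⟨t, h2, hb⟩
    · rw [Bool.and_eq_true, pvTrig_high cs t h2] at hb
      simp at hb
  · rintro ⟨t, ht, hb⟩
    exact ⟨t, by omega, hb⟩

theorem pvAdded_succ (cs : List Char) (i j' : Nat) :
    pvAdded cs (i + 1) j' = (pvAdded cs i j' || (pvTrig cs i && (pvScan cs (i + 1) == j'))) := by
  simp [pvAdded, List.range_succ]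

theorem pvBLoop_step (cs : List Char) (ch : Char) (rest : List Char) (i : Nat) (b : List Int)
    (pending : Bool) :
    pvBLoop cs (ch :: rest) i b pending =
      pvBLoop cs rest (i + 1)
        (if pending && !PySem.Chars.isspace ch then PySem.Set.add b (i : Int) else b)
        (if pvEnders.contains ch ||
            (ch == ':' && decide (0 < i) && pvEnders.contains (cs.getD (i - 1) ' ')) then true
         else if pending && !PySem.Chars.isspace ch then false else pending) := by
  simp only [pvBLoop]
  by_cases hc : (pending && !PySem.Chars.isspace ch) = true <;> simp [hc]

theorem pvALoop_step (cs : List Char) (ch : Char) (rest : List Char) (i : Nat) (b : List Int) :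
    pvALoop cs (ch :: rest) i b =
      pvALoop cs rest (i + 1)
        (let b1 := if pvEnders.contains ch then
            (if pvScan cs (i + 1) < cs.length then PySem.Set.add b ((pvScan cs (i + 1) : Nat) : Int) else b)
          else b
         if ch == ':' && decide (0 < i) && pvEnders.contains (cs.getD (i - 1) ' ') then
            (if pvScan cs (i + 1) < cs.length then PySem.Set.add b1 ((pvScan cs (i + 1) : Nat) : Int) else b1)
         else b1) := by
  simp only [pvALoop]

theorem pvALoop_body (cs : List Char) (j : Nat) (b : List Int) :
    (let b1 := if pvEnders.contains (cs.getD j ' ') then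
        (if pvScan cs (j + 1) < cs.length then PySem.Set.add b ((pvScan cs (j + 1) : Nat) : Int) else b)
      else b
     if (cs.getD j ' ') == ':' && decide (0 < j) && pvEnders.contains (cs.getD (j - 1) ' ') then
        (if pvScan cs (j + 1) < cs.length then PySem.Set.add b1 ((pvScan cs (j + 1) : Nat) : Int) else b1)
     else b1)
    = if pvTrig cs j then
        (if pvScan cs (j + 1) < cs.length then PySem.Set.add b ((pvScan cs (j + 1) : Nat) : Int) else b)
      else b := by
  cases h1 : pvEnders.contains (cs.getD j ' ') with
  | true =>
    have h2 : ((cs.getD j ' ') == ':') = false := by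
      have h1' := h1
      simp only [pvEnders] at h1'
      simp at h1'
      simp only [List.getD_eq_getElem?_getD]
      rcases h1' with h | h | h | h <;> rw [h] <;> rfl
    simp only [pvTrig, h1, h2, Bool.false_and, Bool.true_or, if_true]
    simp
  | false =>
    simp only [pvTrig, h1, Bool.false_or, Bool.false_eq_true, if_false]

-- canonical accumulator
def pvCanon (cs : List Char) (p : Nat → Bool) : List Int :=
  (0 : Int) :: (((List.range cs.length).filter p).map (fun (t : Nat) => (t : Int)))

theorem pvBLoop_inv (cs : List Char) (j : Nat) :
    pvBLoop cs (cs.drop j) j ((0 : Int) :: (((List.range j).filter (pvP cs)).map (fun (t : Nat) => (t : Int)))) (pvPend cs j)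
      = pvCanon cs (pvP cs) := by
  induction hd : cs.length - j generalizing j with
  | zero =>
    rw [List.drop_eq_nil_of_le (by omega)]
    simp only [pvBLoop, pvCanon]
    rw [pvFilter_high cs.length j (by omega) (fun t ht => pvP_high cs t ht)]
  | succ d ih =>
    have hj : j < cs.length := by omega
    rw [pvDrop_cons cs j hj, pvBLoop_step]
    have hcond : (pvPend cs j && !PySem.Chars.isspace (cs.getD j ' ')) = pvP cs j := rfl
    rw [hcond]
    have hacc : (if pvP cs j then PySem.Set.add ((0 : Int) :: (((List.range j).filter (pvP cs)).map (fun (t : Nat) => (t : Int)))) (j : Int)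
          else ((0 : Int) :: (((List.range j).filter (pvP cs)).map (fun (t : Nat) => (t : Int)))))
        = (0 : Int) :: (((List.range (j + 1)).filter (pvP cs)).map (fun (t : Nat) => (t : Int))) := by
      by_cases hP : pvP cs j = true
      · rw [if_pos hP]
        have hpend : pvPend cs j = true := ((Bool.and_eq_true _ _).mp hP).1
        have hj1 : 1 ≤ j := pvPend_pos cs j hpend
        have hnotmem : ((j : Nat) : Int) ∉
            ((0 : Int) :: (((List.range j).filter (pvP cs)).map (fun (t : Nat) => (t : Int)))) := by
          simp only [List.mem_cons, List.mem_map, List.mem_filter, List.mem_range]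
          rintro (h0 | ⟨t, ⟨ht, _⟩, hcast⟩)
          · have : (0 : Int) = (j : Nat) := h0.symm
            omega
          · have : t = j := by exact_mod_cast hcast
            omega
        rw [PySem.Set.add_of_not_mem hnotmem, List.range_succ, List.filter_append,
          List.map_append]
        simp [hP]
      · rw [if_neg hP, List.range_succ, List.filter_append]
        simp only [Bool.not_eq_true] at hP
        simp [hP]
    rw [hacc]
    have hpend' : (if pvTrig cs j then true else if pvP cs j then false else pvPend cs j)
        = pvPend cs (j + 1) := by
      cases htr : pvTrig cs j <;> cases hp : pvPend cs j <;>
        cases hsp : PySem.Chars.isspace (cs.getD j ' ') <;>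
        simp [pvPend, pvP, htr, hp]
    have htrig : (pvEnders.contains (cs.getD j ' ') ||
        ((cs.getD j ' ') == ':' && decide (0 < j) && pvEnders.contains (cs.getD (j - 1) ' ')))
        = pvTrig cs j := rfl
    rw [htrig, hpend']
    exact ih (j + 1) (by omega)

theorem pvALoop_inv (cs : List Char) (j : Nat) :
    pvALoop cs (cs.drop j) j (pvCanon cs (pvAdded cs j)) = pvCanon cs (pvAdded cs cs.length) := by
  induction hd : cs.length - j generalizing j with
  | zero =>
    rw [List.drop_eq_nil_of_le (by omega)]
    simp only [pvALoop, pvCanon]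
    rw [List.filter_congr (fun t _ => pvAdded_high cs j t (by omega))]
  | succ d ih =>
    have hj : j < cs.length := by omega
    rw [pvDrop_cons cs j hj, pvALoop_step, pvALoop_body]
    have key : (if pvTrig cs j then
          (if pvScan cs (j + 1) < cs.length then
            PySem.Set.add (pvCanon cs (pvAdded cs j)) ((pvScan cs (j + 1) : Nat) : Int)
           else pvCanon cs (pvAdded cs j))
        else pvCanon cs (pvAdded cs j)) = pvCanon cs (pvAdded cs (j + 1)) := by
      by_cases htr : pvTrig cs j = true
      · rw [if_pos htr]
        by_cases hsn : pvScan cs (j + 1) < cs.length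
        · rw [if_pos hsn]
          by_cases hmem : pvAdded cs j (pvScan cs (j + 1)) = true
          · have hin : ((pvScan cs (j + 1) : Nat) : Int) ∈ pvCanon cs (pvAdded cs j) := by
              unfold pvCanon
              simp only [List.mem_cons, List.mem_map, List.mem_filter, List.mem_range]
              exact Or.inr ⟨pvScan cs (j + 1), ⟨hsn, hmem⟩, rfl⟩
            rw [PySem.Set.add_of_mem hin]
            unfold pvCanon
            rw [List.filter_congr (fun t _ => ?_)]
            rw [pvAdded_succ]
            by_cases hts : t = pvScan cs (j + 1)
            · subst hts
              simp [hmem]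
            · have : (pvScan cs (j + 1) == t) = false := by
                simp [Ne.symm hts]
              simp [this]
          · have hge : j + 1 ≤ pvScan cs (j + 1) := pvScan_ge cs (j + 1)
            have hnotin : ((pvScan cs (j + 1) : Nat) : Int) ∉ pvCanon cs (pvAdded cs j) := by
              unfold pvCanon
              simp only [List.mem_cons, List.mem_map, List.mem_filter, List.mem_range]
              rintro (h0 | ⟨t, ⟨ht, hadd⟩, hcast⟩)
              · have : pvScan cs (j + 1) = 0 := by exact_mod_cast h0
                omega
              · have : t = pvScan cs (j + 1) := by exact_mod_cast hcast
                subst this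
                exact hmem hadd
            rw [PySem.Set.add_of_not_mem hnotin]
            have hfilters : (List.range cs.length).filter (pvAdded cs (j + 1))
                = (List.range cs.length).filter (pvAdded cs j) ++ [pvScan cs (j + 1)] := by
              apply pvFilter_point (pvScan cs (j + 1)) cs.length hsn
              · intro t hts
                rw [pvAdded_succ]
                have : (pvScan cs (j + 1) == t) = false := by
                  simp [Ne.symm hts]
                simp [this]
              · rw [pvAdded_succ]
                simp [htr]
              · cases h : pvAdded cs j (pvScan cs (j + 1))
                · rfl
                · exact absurd h hmem
              · intro t hp
                simp only [pvAdded, List.any_eq_true, List.mem_range, Bool.and_eq_true,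
                  beq_iff_eq] at hp
                obtain ⟨u, hu, _, hscan⟩ := hp
                have := pvScan_mono cs (show u + 1 ≤ j + 1 by omega)
                omega
            unfold pvCanon
            rw [hfilters, List.map_append]
            rfl
        · rw [if_neg hsn]
          unfold pvCanon
          rw [List.filter_congr (fun t ht => ?_)]
          rw [pvAdded_succ]
          have : (pvScan cs (j + 1) == t) = false := by
            simp only [List.mem_range] at ht
            have : t ≠ pvScan cs (j + 1) := by omega
            simp [Ne.symm this]
          simp [this]
      · rw [if_neg htr]
        unfold pvCanon
        rw [List.filter_congr (fun t _ => ?_)]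
        rw [pvAdded_succ]
        simp only [Bool.not_eq_true] at htr
        simp [htr]
    rw [key]
    exact ih (j + 1) (by omega)

-- ===== VERDICT (by name: the statement is the Claim_ definition above) =====
theorem precompute_sentence_boundaries_spec : Claim_equal_precompute_sentence_boundaries := by
  intro content _
  unfold Spec_precompute_sentence_boundaries
  unfold precompute_sentence_boundaries precompute_sentence_boundaries_alt
  have hA := pvALoop_inv content.toList 0
  have hB := pvBLoop_inv content.toList 0
  simp only [List.drop_zero, List.range_zero, List.filter_nil, List.map_nil] at hA hB
  have h0A : pvCanon content.toList (pvAdded content.toList 0) = [(0 : Int)] := by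
    unfold pvCanon
    have : (List.range content.toList.length).filter (pvAdded content.toList 0) = [] := by
      apply List.filter_eq_nil_iff.mpr
      intro t _
      simp [pvAdded]
    rw [this]
    rfl
  rw [h0A] at hA
  have hpend0 : pvPend content.toList 0 = false := rfl
  rw [hpend0] at hB
  rw [hA, hB]
  unfold pvCanon
  rw [List.filter_congr (fun t ht => pvAdded_eq_P content.toList t (by simpa using ht))]
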